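/-
  THE LEMMAS THE WALKER APPLIES (UserX/Walk.lean builds proof terms from them; none is a `simp` rule).

      State.reg_setReg_same / _ne        a register read through a register write, decided by a closed test
      State.w_…_writeVecLow              the projections of a legacy-SSE register write
      RegsKept.cons / .setMxcsr / …      the register frame along a nest of setters; `Reg.isIn_mono` for literal lists
      HasCodeNat.of_eqOn                 the function's code at a later state, from "nothing was stored into the code span"
      Mem.EqOn.step_writeLE_has / .of_mem_eq     the code span along a store / a state with the same memory
      Layout.Has.of_add                  a sub-range of a range inside the user region, the offset a literal word
      Mem.readLE_writeLE_below / _above  a load below / above a store with the same base address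
      Mem.readLE_writeLE_same'           reading back what was stored   (a store over a store of the same range: UserX/MemNorm.lean)
      ReachVia.step_code                 one instruction of a walk: invariant, code, decode fact, body
      Checked / CheckSpec                the contract of a sanitizer check routine and what a passed check leaves
-/
import UserX.Tac
import UserX.Code
import UserX.ReachVia
import UserX.Contract
import UserX.MemNorm

namespace X86
namespace User

variable {L : Layout} {μ : Microarch}

/-! ### Projections through one setter, with closed side conditions -/

namespace State

/-- A register read through a write of the same register. -/
theorem reg_setReg_same (v : State) (r : Reg) (x : Word) : (v.setReg r x).reg r = x := by
  rw [reg_setReg]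
  exact if_pos rfl

/-- A register read through a write of another register (`h` is a closed test: `Eq.refl false`). -/
theorem reg_setReg_ne (v : State) (r r' : Reg) (x : Word) (h : decide (r' = r) = false) :
    (v.setReg r x).reg r' = v.reg r' := by
  rw [reg_setReg]
  exact if_neg (of_decide_eq_false h)

/-- The projections of a legacy-SSE write of a vector register: everything but `zmm` is untouched. (Argument order of
every projection lemma the walker uses: the state, the arguments of the projection, the arguments of the setter. The names
have a `w_`: UserX/SseStep.lean states the same facts, in another argument order, for the stepping set.) -/
theorem w_reg_writeVecLow (u : State) (r : Reg) (w : VWidth) (q : VReg) (x : Vec) : (u.writeVecLow w q x).reg r = u.reg r :=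
  id rfl
theorem w_rip_writeVecLow (u : State) (w : VWidth) (q : VReg) (x : Vec) : (u.writeVecLow w q x).rip = u.rip := id rfl
theorem w_flags_writeVecLow (u : State) (w : VWidth) (q : VReg) (x : Vec) : (u.writeVecLow w q x).flags = u.flags := id rfl
theorem w_mem_writeVecLow (u : State) (w : VWidth) (q : VReg) (x : Vec) : (u.writeVecLow w q x).mem = u.mem := id rfl
theorem w_mxcsr_writeVecLow (u : State) (w : VWidth) (q : VReg) (x : Vec) : (u.writeVecLow w q x).mxcsr = u.mxcsr := id rfl
/-- The vector registers after a legacy-SSE write: the bits above the written width are preserved. -/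
theorem w_zmm_writeVecLow (u : State) (w : VWidth) (q : VReg) (x : Vec) :
    (u.writeVecLow w q x).zmm = u.zmm.set q ((x &&& w.mask) ||| (u.zmm[q] &&& ~~~w.mask)) := id rfl

end State

/-! ### The register frame -/

/-- One more register in the set of those that may have changed. -/
theorem RegsKept.cons {S : List Reg} {u v : State} (h : RegsKept S u v) (r : Reg) : RegsKept (r :: S) u v := by
  intro r' hr'
  apply h
  rw [Reg.isIn_cons] at hr'
  cases hin : r'.isIn S with
  | false => rfl
  | true =>
    rw [hin, Bool.or_true] at hr'
    exact Bool.noConfusion hr'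

/-- MXCSR is not a general register. -/
theorem RegsKept.setMxcsr {S : List Reg} {v v' : State} (h : RegsKept S v v') (x : Word) : RegsKept S v (v'.setMxcsr x) := h

/-- A vector register is not a general register. -/
theorem RegsKept.writeVecLow {S : List Reg} {v v' : State} (h : RegsKept S v v') (w : VWidth) (q : VReg) (x : Vec) :
    RegsKept S v (v'.writeVecLow w q x) := h

/-- A state equal to one about which the frame is known. -/
theorem RegsKept.of_eq {S : List Reg} {u v v' : State} (h : RegsKept S u v) (e : v' = v) : RegsKept S u v' := e ▸ h

/-- Inclusion of literal register lists, decided by evaluation (`h` is `Eq.refl true`). -/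
theorem _root_.X86.Reg.isIn_mono {S S' : List Reg} (h : S.all (fun s => s.isIn S') = true) (r : Reg)
    (hr : r.isIn S = true) : r.isIn S' = true :=
  (List.all_eq_true.mp h) r (Reg.mem_of_isIn hr)

/-- The frame for a larger literal list. -/
theorem RegsKept.mono_all {S S' : List Reg} {v v' : State} (h : RegsKept S v v')
    (hs : S.all (fun s => s.isIn S') = true) : RegsKept S' v v' :=
  h.mono (Reg.isIn_mono hs)

/-! ### The code of the function at a later state -/

/-- **The function's code is where it was**: nothing was stored into the span `[lo, hi)`, which contains the function. -/
theorem HasCodeNat.of_eqOn {u v : State} {base : Word} {N len lo hi : Nat} (h : HasCodeNat L u base N len)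
    (he : Mem.EqOn lo hi u.mem v.mem) (h1 : lo ≤ base.toNat) (h2 : base.toNat + len ≤ hi) : HasCodeNat L v base N len := by
  refine ⟨?_, h.2⟩
  intro i hi'
  have e := h.2.toNat_add i (Nat.le_of_lt hi')
  rw [he _ (by omega) (by omega)]
  exact h.1 i hi'

/-- The span along a store inside the user region that misses it. -/
theorem Mem.EqOn.step_writeLE_has {lo hi : Nat} {f g : Mem} {a : Word} {k : Nat} (x : Nat) (h : Mem.EqOn lo hi f g)
    (ha : L.Has a k) (hd : a.toNat + k ≤ lo ∨ hi ≤ a.toNat) : Mem.EqOn lo hi f (g.writeLE a k x) :=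
  h.trans (Mem.EqOn.writeLE_has lo hi g x ha hd)

/-- The span at a memory equal to one about which it is known. -/
theorem Mem.EqOn.of_mem_eq {lo hi : Nat} {f g g' : Mem} (h : Mem.EqOn lo hi f g) (e : g' = g) : Mem.EqOn lo hi f g' :=
  e ▸ h

/-! ### Ranges with the same base address -/

/-- A sub-range of a range inside the user region: `a = b + d` with `d` a literal word. -/
theorem Layout.Has.of_add {a b : Word} {n : Nat} (h : L.Has b n) (d : Word) (k : Nat) (e : b + d = a)
    (hdk : d.toNat + k ≤ n) : L.Has a k := by
  have hd : d = UInt64.ofNat d.toNat := (UInt64.ofNat_toNat).symm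
  rw [← e, hd]
  exact h.sub d.toNat k hdk

/-- The number of `a + d` when `a` lies in the user region and `d` is small. -/
theorem Layout.Has.toNat_add_word {a : Word} {k : Nat} (h : L.Has a k) (hk : 0 < k) (d : Word) (hd : d.toNat < 2 ^ 62) :
    (a + d).toNat = a.toNat + d.toNat := by
  have hlt := h.lt hk
  rw [UInt64.toNat_add]
  omega

/-- **A load BELOW a store with the same base address**: `a + d = b`, the load's `k` bytes end before the store. -/
theorem Mem.readLE_writeLE_below (f : Mem) {a b : Word} {n k : Nat} (v : Nat) (hb : L.Has b n) (ha : L.Has a k)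
    (hk : 0 < k) (d : Word) (e : a + d = b) (hd : k ≤ d.toNat) (hlt : d.toNat < 2 ^ 62) :
    (f.writeLE b n v).readLE a k = f.readLE a k := by
  apply Mem.readLE_writeLE_has f v hb ha
  have := ha.toNat_add_word hk d hlt
  rw [e] at this
  omega

/-- **A load ABOVE a store with the same base address**: `b + d = a`, the store's `n` bytes end before the load. -/
theorem Mem.readLE_writeLE_above (f : Mem) {a b : Word} {n k : Nat} (v : Nat) (hb : L.Has b n) (ha : L.Has a k)
    (hn : 0 < n) (d : Word) (e : b + d = a) (hd : n ≤ d.toNat) (hlt : d.toNat < 2 ^ 62) :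
    (f.writeLE b n v).readLE a k = f.readLE a k := by
  apply Mem.readLE_writeLE_has f v hb ha
  have := hb.toNat_add_word hn d hlt
  rw [e] at this
  omega

/-- A load through a store it provably does not meet (the general form: the disjointness is a goal). -/
theorem Mem.readLE_writeLE_disj (f : Mem) {a b : Word} {n k : Nat} (v : Nat) (hb : L.Has b n) (ha : L.Has a k)
    (hd : a.toNat + k ≤ b.toNat ∨ b.toNat + n ≤ a.toNat) : (f.writeLE b n v).readLE a k = f.readLE a k :=
  Mem.readLE_writeLE_has f v hb ha hd

/-- Reading back what was stored (`hn` a closed fact). -/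
theorem Mem.readLE_writeLE_same' (f : Mem) (a : Word) (n v : Nat) (hn : n ≤ 16) :
    (f.writeLE a n v).readLE a n = v % 256 ^ n :=
  Mem.readLE_writeLE_same f a n v (by omega)

/-- The eight bytes of a word read back: the word. -/
theorem ofNat_toNat_mod_256_8 (x : Word) : UInt64.ofNat (x.toNat % 256 ^ 8) = x := by
  have := x.toNat_lt
  rw [Nat.mod_eq_of_lt (by omega)]
  exact UInt64.ofNat_toNat

/-- The number of a word is below `256 ^ 8`. -/
theorem toNat_mod_256_8 (x : Word) : x.toNat % 256 ^ 8 = x.toNat := by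
  have := x.toNat_lt
  exact Nat.mod_eq_of_lt (by omega)

/-- The same with the modulus as a literal (what `Nat.reducePow` leaves). -/
theorem ofNat_toNat_mod_lit (x : Word) : UInt64.ofNat (x.toNat % 18446744073709551616) = x :=
  ofNat_toNat_mod_256_8 x

/-- The same for the number. -/
theorem toNat_mod_lit (x : Word) : x.toNat % 18446744073709551616 = x.toNat :=
  toNat_mod_256_8 x

/-- An embedded 64-bit view of a word is the word. -/
theorem _root_.X86.Word.ofBV_toBV64 (x : Word) : Word.ofBV (x.toBV 64) = x := by
  unfold Word.ofBV Word.toBV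
  rw [BitVec.setWidth_eq, BitVec.setWidth_eq]

/-! ### One instruction of a walk -/

/-- **One instruction of a walk**: the invariant of the way holds at `u`, the function's code is in memory, the instruction
at offset `off` is `ins` with decode fact `hi`, and the body's flat reading from the state with RIP advanced leads on. -/
theorem ReachVia.step_code {I : State → Prop} {u : State} {P : State → Prop} {base : Word} {N len : Nat}
    {ins : List Byte} {keep : Machine → Machine → Machine} {w : Word} {body : Sem Unit} {n : Nat} {next : Word}
    (hinv : I u) (h : HasCodeNat L u base N len) (off : Nat)
    (hi : ∀ has, Dec.IsInsn Dec.allCells (decMode has) ins (Sem.instr keep w body) n)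
    (hrip : u.rip = base + UInt64.ofNat off) (hlen : off + ins.length ≤ len)
    (hins : (N >>> (8 * off)) % 2 ^ (8 * ins.length) = leNat ins) (hnext : u.rip + w = next)
    (hw : ∀ m, Abs L m u →
      Sem.wpUser L μ body (fun _ u' => ReachVia L μ I u' P) (fun _ _ => False) (u.setRip next)) :
    ReachVia L μ I u P :=
  ReachVia.step hinv (Step.of_codeNat h off hi hrip hlen hins hnext hw)

/-! ### Sanitizer checks -/

/-- **What a passed sanitizer check leaves**: it has returned to `ret`, popped the return address, changed only the
registers `clob` (and RSP, RFLAGS), and left memory, the vector registers and MXCSR alone. -/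
structure Checked (clob : List Reg) (u : State) (ret : Word) (v : State) : Prop where
  rip : v.rip = ret
  rsp : v.reg .rsp = u.reg .rsp + 8
  kept : RegsKept (.rsp :: clob) u v
  mem : v.mem = u.mem
  zmm : v.zmm = u.zmm
  mxcsr : v.mxcsr = u.mxcsr
  df : v.flags .df = u.flags .df

/-- **DF through a flag result**: an arithmetic instruction writes status flags only, so the direction flag of
`f.setStatus st` is that of `f`. (What the `inv` field of a `Returned` / of a callee's `AtEntry` needs of the walker's
`w_flags : s.flags = (… .setStatus …).setStatus …`.) -/
theorem df_setStatus (f : Flags) (st : StatusFlags) : (f.setStatus st) .df = f .df := by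
  rw [Flags.get_setStatus]
  rfl

/-- **The contract of a sanitizer check routine `__asan_{load,store}N_noabort` at `entry`**, as a walk uses it
(the runtime's proofs establish it once, for all call sites):

  * `acc mem a` is what the caller must show of the address in RDI: that the check passes (`Accessible` /
    `AccessibleSmall` of Asan/Shadow.lean, together with whatever makes `has` true: `Sealed mem`);
  * `has`: a passed check puts the `n` bytes inside the user region — the side condition of the access that follows;
  * `call`: entered with the return address `ret` on the stack and the routine's code in memory (`codeOK`), the routine
    returns — it never reaches `__asan_report`: every state on the way is in `I` — into a `Checked` state. -/
structure CheckSpec (L : Layout) (μ : Microarch) (I : State → Prop) (codeOK : Mem → Prop) (clob : List Reg) (n : Nat)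
    (acc : Mem → Word → Prop) (entry : Word) : Prop where
  has : ∀ (m : Mem) (a : Word), acc m a → L.Has a n
  call : ∀ (u : State) (ret : Word), u.rip = entry → codeOK u.mem → L.Has (u.reg .rsp) 8 →
    UInt64.ofNat (u.mem.readLE (u.reg .rsp) 8) = ret → ret < 0x40000000 → acc u.mem (u.reg .rdi) →
    ReachVia L μ I u (Checked clob u ret)

/-- **Using a check contract inside a walk**: the walk stands at the routine's entry. -/
theorem CheckSpec.use {I : State → Prop} {codeOK : Mem → Prop} {clob : List Reg} {n : Nat} {acc : Mem → Word → Prop}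
    {entry : Word} {P : State → Prop} (hc : CheckSpec L μ I codeOK clob n acc entry) {u : State} (ret a : Word)
    (hrip : u.rip = entry) (hcode : codeOK u.mem) (hsp : L.Has (u.reg .rsp) 8)
    (hret : UInt64.ofNat (u.mem.readLE (u.reg .rsp) 8) = ret) (hlt : ret < 0x40000000) (hrdi : u.reg .rdi = a)
    (hacc : acc u.mem a) (hk : ∀ v, Checked clob u ret v → ReachVia L μ I v P) : ReachVia L μ I u P :=
  (hc.call u ret hrip hcode hsp hret hlt (hrdi ▸ hacc)).trans hk

/-! ### Indirect calls -/

/-- **An indirect call**: the target is one of finitely many entries, each with its contract; the walk goes on from a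
returned state of whichever it was. (`cases` is a list of "the state is at this entry, and from there the rest is
reachable": one per possible target; the caller shows that the target register holds one of them.) -/
theorem ReachVia.of_targets {I : State → Prop} {u : State} {P : State → Prop} (targets : List Word)
    (hin : u.rip ∈ targets) (h : ∀ t ∈ targets, u.rip = t → ReachVia L μ I u P) : ReachVia L μ I u P :=
  h u.rip hin rfl

end User
end X86
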